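-- pv_equiv track=rewrite | github.com/Learneraf/DistServe | simdistserve/algorithm/heterogeneous_placement.py | _enumerate_allocations_from_capacities
-- ===== SOURCE A (Python) =====
-- def _enumerate_allocations_from_capacities(
--     node_caps: list[tuple[str, int]],
--     target_instances: int,
--     idx: int = 0,
-- ) -> list[dict[str, int]]:
--     if target_instances == 0:
--         return [{}]
--     if idx >= len(node_caps):
--         return []
--
--     node_name, capacity = node_caps[idx]
--     allocations: list[dict[str, int]] = []
--     max_assign = min(capacity, target_instances)
--     for assigned in range(max_assign + 1):
--         tail_allocations = _enumerate_allocations_from_capacities(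
--             node_caps,
--             target_instances - assigned,
--             idx + 1,
--         )
--         for tail in tail_allocations:
--             merged = dict(tail)
--             if assigned > 0:
--                 merged[node_name] = assigned
--             allocations.append(merged)
--     return allocations
-- ===== SOURCE B (Python) =====
-- def _enumerate_allocations_from_capacities(
--     node_caps: list,
--     target_instances: int,
--     idx: int = 0,
-- ) -> list:
--     cache = {}
--     n = len(node_caps)
--
--     def solve(i, t):
--         if t == 0:
--             return [{}]
--         if i >= n:
--             return []
--         hit = cache.get((i, t))
--         if hit is not None:
--             return hit
--         name, capacity = node_caps[i]
--         res = []
--         for assigned in range(min(capacity, t) + 1):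
--             for tail in solve(i + 1, t - assigned):
--                 merged = dict(tail)
--                 if assigned > 0:
--                     merged[name] = assigned
--                 res.append(merged)
--         cache[(i, t)] = res
--         return res
--
--     return solve(idx, target_instances)
-- ===== Notes on version B (the rewrite author's own statement) =====
-- stated objective: alternative
-- what changed: B memoizes subproblem results keyed on (idx, remaining target) in a dict threaded through the recursion, so shared tail enumerations are computed once instead of being re-enumerated on every assignment prefix that reaches the same state.
import Mathlib
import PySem

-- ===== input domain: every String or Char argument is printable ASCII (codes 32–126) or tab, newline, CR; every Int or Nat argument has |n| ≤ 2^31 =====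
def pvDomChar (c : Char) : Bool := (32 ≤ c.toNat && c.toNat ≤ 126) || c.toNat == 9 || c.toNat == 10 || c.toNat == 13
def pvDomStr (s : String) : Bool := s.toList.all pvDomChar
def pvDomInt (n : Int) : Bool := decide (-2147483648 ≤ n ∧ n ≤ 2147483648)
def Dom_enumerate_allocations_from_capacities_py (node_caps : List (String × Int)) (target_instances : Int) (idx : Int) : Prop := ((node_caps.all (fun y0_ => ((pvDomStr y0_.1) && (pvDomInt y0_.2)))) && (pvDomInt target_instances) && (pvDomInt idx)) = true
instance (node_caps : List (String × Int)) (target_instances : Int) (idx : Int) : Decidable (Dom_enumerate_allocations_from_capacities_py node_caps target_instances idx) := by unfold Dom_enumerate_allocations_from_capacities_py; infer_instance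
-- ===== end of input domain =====

-- B memoizes subproblem results on (idx, remaining target) so shared tail enumerations are computed once.
-- ===== PORT A =====
def enumerate_allocations_from_capacities_py (node_caps : List (String × Int)) (target_instances : Int) (idx : Int) : List (List (String × Int)) :=
  if target_instances = 0 then [[]]
  else if _h : idx ≥ (node_caps.length : Int) then []
  else
    match PySem.List.pyGet? node_caps idx with
    | none => []  -- Python raises IndexError here; excluded by Pre_
    | some (node_name, capacity) =>
      (PySem.List.pyRange 0 (min capacity target_instances + 1) 1).foldl
        (fun allocations assigned =>
          allocations ++
            (enumerate_allocations_from_capacities_py node_caps (target_instances - assigned) (idx + 1)).map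
              (fun tail => if assigned > 0 then ((PySem.Dict.mk tail).insert node_name assigned).items else tail))
        []
termination_by ((node_caps.length : Int) - idx).toNat
decreasing_by omega

-- ===== PORT B =====
-- B's solve: threads the memo cache through the computation; returns (updated cache, result).
def pvBSolve (node_caps : List (String × Int)) (cache : PySem.Dict (Int × Int) (List (List (String × Int)))) (i t : Int) :
    PySem.Dict (Int × Int) (List (List (String × Int))) × List (List (String × Int)) :=
  if t = 0 then (cache, [[]])
  else if _h : i ≥ (node_caps.length : Int) then (cache, [])
  else
    match cache.get? (i, t) with
    | some hit => (cache, hit)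
    | none =>
      match PySem.List.pyGet? node_caps i with
      | none => (cache, [])  -- Python raises IndexError here; excluded by Pre_
      | some (name, capacity) =>
        let st := (PySem.List.pyRange 0 (min capacity t + 1) 1).foldl
          (fun st assigned =>
            let r := pvBSolve node_caps st.1 (i + 1) (t - assigned)
            (r.1, st.2 ++ r.2.map
              (fun tail => if assigned > 0 then ((PySem.Dict.mk tail).insert name assigned).items else tail)))
          (cache, [])
        (st.1.insert (i, t) st.2, st.2)
termination_by ((node_caps.length : Int) - i).toNat
decreasing_by omega

def enumerate_allocations_from_capacities_py_alt (node_caps : List (String × Int)) (target_instances : Int) (idx : Int) : List (List (String × Int)) :=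
  (pvBSolve node_caps PySem.Dict.empty idx target_instances).2

-- ===== PRECONDITION & SPEC =====
-- Pre_ excludes exactly the inputs where A raises IndexError: target ≠ 0 with idx below -len(node_caps).
def Pre_enumerate_allocations_from_capacities_py (node_caps : List (String × Int)) (target_instances : Int) (idx : Int) : Prop :=
  target_instances = 0 ∨ -(node_caps.length : Int) ≤ idx
instance (node_caps : List (String × Int)) (target_instances : Int) (idx : Int) : Decidable (Pre_enumerate_allocations_from_capacities_py node_caps target_instances idx) := by unfold Pre_enumerate_allocations_from_capacities_py; infer_instance
def pvWitness_enumerate_allocations_from_capacities_py : (List (String × Int)) × Int × Int := ([("a", 2), ("b", 1)], 2, 0)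
def Spec_enumerate_allocations_from_capacities_py (node_caps : List (String × Int)) (target_instances : Int) (idx : Int) (out : List (List (String × Int))) : Prop := out = enumerate_allocations_from_capacities_py_alt node_caps target_instances idx
instance (node_caps : List (String × Int)) (target_instances : Int) (idx : Int) (out : List (List (String × Int))) : Decidable (Spec_enumerate_allocations_from_capacities_py node_caps target_instances idx out) := by unfold Spec_enumerate_allocations_from_capacities_py; infer_instance

-- ===== CLAIM (what is proved, stated in full; the proofs are below) =====
def Claim_equal_enumerate_allocations_from_capacities_py : Prop := ∀ (node_caps : List (String × Int)) (target_instances : Int) (idx : Int), Dom_enumerate_allocations_from_capacities_py node_caps target_instances idx → Pre_enumerate_allocations_from_capacities_py node_caps target_instances idx → Spec_enumerate_allocations_from_capacities_py node_caps target_instances idx (enumerate_allocations_from_capacities_py node_caps target_instances idx)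

-- ===== LEMMAS AND PROOFS =====

-- cache invariant: every memoized entry is the value A computes for that (idx, target) state
def pvCacheGood (node_caps : List (String × Int)) (c : PySem.Dict (Int × Int) (List (List (String × Int)))) : Prop :=
  ∀ p r, c.get? p = some r → r = enumerate_allocations_from_capacities_py node_caps p.2 p.1

-- the inner for-loop of B computes A's inner foldl and keeps the cache good
theorem pvLoop_ok (node_caps : List (String × Int)) (name : String) (i t : Int)
    (hsolve : ∀ (t' : Int) (c : PySem.Dict (Int × Int) (List (List (String × Int)))),
      pvCacheGood node_caps c →
      pvCacheGood node_caps (pvBSolve node_caps c (i + 1) t').1 ∧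
        (pvBSolve node_caps c (i + 1) t').2 = enumerate_allocations_from_capacities_py node_caps t' (i + 1)) :
    ∀ (as : List Int) (c : PySem.Dict (Int × Int) (List (List (String × Int)))) (acc : List (List (String × Int))),
      pvCacheGood node_caps c →
      pvCacheGood node_caps ((as.foldl
          (fun st assigned =>
            ((pvBSolve node_caps st.1 (i + 1) (t - assigned)).1, st.2 ++ (pvBSolve node_caps st.1 (i + 1) (t - assigned)).2.map
              (fun tail => if assigned > 0 then ((PySem.Dict.mk tail).insert name assigned).items else tail)))
          (c, acc)).1) ∧
        (as.foldl
          (fun st assigned =>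
            ((pvBSolve node_caps st.1 (i + 1) (t - assigned)).1, st.2 ++ (pvBSolve node_caps st.1 (i + 1) (t - assigned)).2.map
              (fun tail => if assigned > 0 then ((PySem.Dict.mk tail).insert name assigned).items else tail)))
          (c, acc)).2 =
        as.foldl
          (fun allocations assigned =>
            allocations ++
              (enumerate_allocations_from_capacities_py node_caps (t - assigned) (i + 1)).map
                (fun tail => if assigned > 0 then ((PySem.Dict.mk tail).insert name assigned).items else tail))
          acc := by
  intro as
  induction as with
  | nil => intro c acc hc; exact ⟨hc, rfl⟩
  | cons a rest ih2 =>
    intro c acc hc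
    simp only [List.foldl_cons]
    obtain ⟨h1, h2⟩ := hsolve (t - a) c hc
    rw [h2]
    exact ih2 _ _ h1

theorem pvSolve_ok (node_caps : List (String × Int)) :
    ∀ (k : Nat) (i t : Int) (cache : PySem.Dict (Int × Int) (List (List (String × Int)))),
      ((node_caps.length : Int) - i).toNat ≤ k → pvCacheGood node_caps cache →
      pvCacheGood node_caps (pvBSolve node_caps cache i t).1 ∧
        (pvBSolve node_caps cache i t).2 = enumerate_allocations_from_capacities_py node_caps t i := by
  intro k
  induction k with
  | zero =>
    intro i t cache hk hg
    have hi : i ≥ (node_caps.length : Int) := by omega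
    rw [pvBSolve, enumerate_allocations_from_capacities_py]
    by_cases ht : t = 0
    · simp only [ht, if_true]; exact ⟨hg, by trivial⟩
    · simp only [if_neg ht, dif_pos hi]; exact ⟨hg, by trivial⟩
  | succ k ih =>
    intro i t cache hk hg
    by_cases ht : t = 0
    · rw [pvBSolve, enumerate_allocations_from_capacities_py]
      simp only [ht, if_true]; exact ⟨hg, by trivial⟩
    by_cases hi : i ≥ (node_caps.length : Int)
    · rw [pvBSolve, enumerate_allocations_from_capacities_py]
      simp only [if_neg ht, dif_pos hi]; exact ⟨hg, by trivial⟩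
    cases hhit : cache.get? (i, t) with
    | some hit =>
      rw [pvBSolve]
      simp only [if_neg ht, dif_neg hi, hhit]
      exact ⟨hg, hg (i, t) hit hhit⟩
    | none =>
      cases hpg : PySem.List.pyGet? node_caps i with
      | none =>
        rw [pvBSolve, enumerate_allocations_from_capacities_py]
        simp only [if_neg ht, dif_neg hi, hhit, hpg]
        exact ⟨hg, by trivial⟩
      | some nc =>
        obtain ⟨name, capacity⟩ := nc
        have hlt : ((node_caps.length : Int) - (i + 1)).toNat ≤ k := by omega
        have hsolve : ∀ (t' : Int) (c : PySem.Dict (Int × Int) (List (List (String × Int)))),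
            pvCacheGood node_caps c →
            pvCacheGood node_caps (pvBSolve node_caps c (i + 1) t').1 ∧
              (pvBSolve node_caps c (i + 1) t').2 =
                enumerate_allocations_from_capacities_py node_caps t' (i + 1) :=
          fun t' c hc => ih (i + 1) t' c hlt hc
        obtain ⟨h1, h2⟩ := pvLoop_ok node_caps name i t hsolve
          (PySem.List.pyRange 0 (min capacity t + 1) 1) cache [] hg
        rw [pvBSolve]
        simp only [if_neg ht, dif_neg hi, hhit, hpg]
        constructor
        · intro p r h
          rw [PySem.Dict.get?_insert] at h
          split at h
          · next hp =>
            cases h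
            subst hp
            rw [enumerate_allocations_from_capacities_py]
            simp only [if_neg ht, dif_neg hi, hpg]
            exact h2
          · exact h1 p r h
        · rw [enumerate_allocations_from_capacities_py]
          simp only [if_neg ht, dif_neg hi, hpg]
          exact h2

-- ===== VERDICT (by name: the statement is the Claim_ definition above) =====
theorem enumerate_allocations_from_capacities_py_spec : Claim_equal_enumerate_allocations_from_capacities_py := by
  intro node_caps target_instances idx _hD _hP
  unfold Spec_enumerate_allocations_from_capacities_py enumerate_allocations_from_capacities_py_alt
  exact ((pvSolve_ok node_caps (((node_caps.length : Int) - idx).toNat) idx target_instances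
    PySem.Dict.empty le_rfl (by intro p r h; simp [PySem.Dict.get?_empty] at h)).2).symm
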